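-- pv_equiv track=rewrite | github.com/isseis/binoxxo-solver | binoxxo_solver.py | fill_try
-- ===== SOURCE A (Python) =====
-- def permutations(a, b):
--     if a == 0 and b == 0:
--         return []
--     elif a == 0:
--         return [['O'] * b]
--     elif b == 0:
--         return [['X'] * a]
--     else:
--         r = []
--         for l in permutations(a-1, b):
--             r.append(['X'] + l)
--         for l in permutations(a, b-1):
--             r.append(['O'] + l)
--         return r
--
-- def merge(L, l):
--     if L.count(' ') != len(l):
--         raise RuntimeError('Number of element mismatch. '
--                 + 'L=' + str(L) + ', l=' + str(l))
--     return [l.pop(0) if E == ' ' else E for E in L]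
--
-- def fill_try(l):
--     if l.count('O') < 3 and l.count('X') < 3:
--         return 0
--
--     # result[i] holds a set of characters which can be placed at the l[i]
--     result = []
--     for i in range(len(l)):
--         result.append(set())
--
--     for g in permutations(5 - l.count('X'), 5 - l.count('O')):
--         merged = merge(l, g)
--         if validate_line(merged):
--             for i, e in enumerate(merged):
--                 result[i].add(e)
--
--     changed = 0
--     for i, e in enumerate(l):
--         if len(result[i]) == 1 and l[i] == ' ':
--             changed += 1
--             l[i] = result[i].pop()
--
--     return changed
--
-- def validate_line(l):
--     def _sub(l):
--         for i in range(len(l) - 2):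
--             # Rule 2. Es dürfen nicht mehr als zwei aufeinanderfolgende
--             # X und O in einer Zeile oder Spalte vorkommen.
--             if l[i] != ' ' and l[i] == l[i+1] == l[i+2]:
--                 return False
--         return True
--
--     return (l.count('O') + l.count('X') + l.count(' ') == len(l)
--             # Rule 3. Pro Zeile und Spalte hat es gleich viele X und O.
--             # Note some cells can be empty while solving the puzzle.
--             and l.count('O') <= len(l) / 2
--             and l.count('X') <= len(l) / 2
--             and _sub(l))
-- ===== SOURCE B (Python) =====
-- def validate_line(l):
--     def _sub(l):
--         for i in range(len(l) - 2):
--             if l[i] != ' ' and l[i] == l[i+1] == l[i+2]: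
--                 return False
--         return True
--
--     return (l.count('O') + l.count('X') + l.count(' ') == len(l)
--             and l.count('O') <= len(l) / 2
--             and l.count('X') <= len(l) / 2
--             and _sub(l))
--
-- def _search(line, rest):
--     # is there some X/O assignment of the blank positions in rest making line valid?
--     if not rest:
--         return validate_line(line)
--     for c in ('X', 'O'):
--         line[rest[0]] = c
--         if _search(line, rest[1:]):
--             return True
--     return False
--
-- def _completable(l, blanks, i, c):
--     # does a valid full assignment of the blanks exist with blank i = c?
--     line = list(l)
--     line[i] = c
--     return _search(line, [j for j in blanks if j != i])
--
-- def fill_try(l):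
--     if l.count('O') < 3 and l.count('X') < 3:
--         return 0
--     blanks = [i for i, e in enumerate(l) if e == ' ']
--     forced = []
--     for i in blanks:
--         feas = [c for c in ('X', 'O') if _completable(l, blanks, i, c)]
--         if len(feas) == 1:
--             forced.append((i, feas[0]))
--     for i, c in forced:
--         l[i] = c
--     return len(forced)
-- ===== Notes on version B (the rewrite author's own statement) =====
-- stated objective: alternative
-- what changed: A enumerates every exact-count completion of the line (permutations of 5-X 'X's and 5-O 'O's), merges each into the line and intersects per-position character sets; B instead tests each blank cell individually, asking via a backtracking search over the remaining blanks whether a valid completion exists with that cell = 'X' and with 'O', and marks the cell forced iff exactly one letter is feasible.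
-- outside the precondition, e.g. on fill_try([' ', ' ', 'X', 'X', 'O', 'X', 'X', 'O', 'O', 'X', 'O', 'O']): A returns 0, B returns 2
import Mathlib
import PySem

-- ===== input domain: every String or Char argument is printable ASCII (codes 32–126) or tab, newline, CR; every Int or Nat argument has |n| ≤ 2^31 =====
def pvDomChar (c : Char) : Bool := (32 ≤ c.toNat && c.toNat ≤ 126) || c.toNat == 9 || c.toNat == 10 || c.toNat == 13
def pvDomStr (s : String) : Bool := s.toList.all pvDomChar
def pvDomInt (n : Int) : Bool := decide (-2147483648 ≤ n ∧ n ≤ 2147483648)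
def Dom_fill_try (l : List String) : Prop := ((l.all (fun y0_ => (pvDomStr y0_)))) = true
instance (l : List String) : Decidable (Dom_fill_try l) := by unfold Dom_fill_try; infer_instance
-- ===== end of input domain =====

-- B replaces A's enumerate-all-exact-count-completions-then-intersect core by a per-blank
-- feasibility test (backtracking over the remaining blanks). Both Pythons mutate the caller's
-- list (they fill the forced cells in place; inside Pre_ they write the same cells); the
-- equivalence proved here is about the RETURN value only.

-- ===== PORT A =====

-- validate_line, shared helper of the module (used verbatim by both A and B):
-- Python's `l.count('O') <= len(l)/2` compares an int with the exact float len/2,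
-- which is equivalent to 2*count <= len.
def sub_validate (l : List String) : Bool :=
  (List.range (l.length - 2)).all (fun i =>
    !(decide (l.getD i "" ≠ " ") && decide (l.getD i "" = l.getD (i+1) "")
      && decide (l.getD (i+1) "" = l.getD (i+2) "")))

def validate_line (l : List String) : Bool :=
  decide (l.count "O" + l.count "X" + l.count " " = l.length)
  && decide (2 * l.count "O" ≤ l.length)
  && decide (2 * l.count "X" ≤ l.length)
  && sub_validate l

-- permutations(a, b); fuel stands in for Python's unbounded recursion (Python diverges
-- when a < 0 and b > 0 or symmetric — outside Pre_); ['X']*a for a < 0 is [].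
def permsA : Nat → Int → Int → List (List String)
  | 0, _, _ => []
  | fuel+1, a, b =>
    if a = 0 ∧ b = 0 then []
    else if a = 0 then [List.replicate b.toNat "O"]
    else if b = 0 then [List.replicate a.toNat "X"]
    else ((permsA fuel (a-1) b).map (fun t => "X" :: t))
      ++ ((permsA fuel a (b-1)).map (fun t => "O" :: t))

-- merge(L, l): [l.pop(0) if E == ' ' else E for E in L]; the count-mismatch RuntimeError
-- is raised in fill_try's loop and is excluded by Pre_ (guarded there).
def mergeA : List String → List String → List String
  | [], _ => []
  | e :: L, g =>
    if e = " " then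
      match g with
      | [] => []            -- unreachable under the length guard in fill_try
      | c :: g' => c :: mergeA L g'
    else e :: mergeA L g

def fill_try (l : List String) : Int :=
  if l.count "O" < 3 ∧ l.count "X" < 3 then 0
  else
    let ps := permsA ((5 - (l.count "X" : Int)).toNat + (5 - (l.count "O" : Int)).toNat + 1)
                (5 - (l.count "X" : Int)) (5 - (l.count "O" : Int))
    if ps.all (fun g => g.length = l.count " ") then
      -- result[i]: set of characters that can be placed at l[i]
      let result := ps.foldl (fun res g =>
          let m := mergeA l g
          if validate_line m then List.zipWith (fun s e => PySem.Set.add s e) res m else res)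
        (List.replicate l.length (PySem.Set.ofList ([] : List String)))
      (l.zip result).foldl
        (fun c p => if p.2.length = 1 ∧ p.1 = " " then c + 1 else c) (0 : Int)
    else 0  -- Python raises RuntimeError in merge here (outside Pre_)

-- ===== PORT B =====

-- _search(line, rest): some X/O assignment of the blank positions in rest makes line valid?
def searchB : List String → List Int → Bool
  | line, [] => validate_line line
  | line, j :: rs =>
      searchB (PySem.List.pySetD line j "X") rs || searchB (PySem.List.pySetD line j "O") rs

-- _completable(l, blanks, i, c)
def completableB (l : List String) (blanks : List Int) (i : Int) (c : String) : Bool :=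
  searchB (PySem.List.pySetD l i c) (blanks.filter (fun j => j ≠ i))

def fill_try_alt (l : List String) : Int :=
  if l.count "O" < 3 ∧ l.count "X" < 3 then 0
  else
    let blanks := (PySem.List.enumerate l).filterMap
      (fun p => if p.2 = " " then some p.1 else none)
    let forced := blanks.filterMap (fun i =>
      let feas := (["X", "O"]).filter (fun c => completableB l blanks i c)
      if feas.length = 1 then some (i, feas.headD "") else none)
    (forced.length : Int)

-- ===== PRECONDITION & SPEC =====

-- Pre_ excludes lines whose blank count disagrees with A's hardcoded 10-cell assumption
-- (it always places 5−X further 'X's and 5−O further 'O's): on those A either raises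
-- (RuntimeError in merge, or unbounded recursion in permutations), or — when the line
-- already holds five 'X' and five 'O' yet still has blanks, a malformed over-length
-- board — its enumeration is empty and it returns 0 while B may fill blanks of the
-- longer line; both behaviours are defensible on such out-of-domain boards.
def Pre_fill_try (l : List String) : Prop :=
  (l.count "O" < 3 ∧ l.count "X" < 3)
  ∨ (l.count "X" ≤ 5 ∧ l.count "O" ≤ 5 ∧ l.count " " + l.count "X" + l.count "O" = 10)
  ∨ (l.count " " = 0 ∧ ((l.count "X" = 5 ∧ 5 ≤ l.count "O") ∨ (l.count "O" = 5 ∧ 5 ≤ l.count "X")))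

instance (l : List String) : Decidable (Pre_fill_try l) := by
  unfold Pre_fill_try; infer_instance

def pvWitness_fill_try : List String :=
  ["X", "X", "X", "O", "O", " ", " ", " ", " ", " "]

def Spec_fill_try (l : List String) (out : Int) : Prop := out = fill_try_alt l
instance (l : List String) (out : Int) : Decidable (Spec_fill_try l out) := by
  unfold Spec_fill_try; infer_instance

-- ===== CLAIM (what is proved, stated in full; the proofs are below) =====
def Claim_equal_fill_try : Prop :=
  ∀ (l : List String), Dom_fill_try l → Pre_fill_try l → Spec_fill_try l (fill_try l)

-- ===== LEMMAS AND PROOFS =====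

-- `m` is `l` with every blank replaced by 'X' or 'O' and every other cell kept.
abbrev ComplOf (l m : List String) : Prop :=
  List.Forall₂ (fun e f => if e = " " then (f = "X" ∨ f = "O") else f = e) l m

-- the character c can stand at position i in some valid completion of l
def Feas (l : List String) (i : Nat) (c : String) : Prop :=
  ∃ m, ComplOf l m ∧ validate_line m = true ∧ m.getD i "" = c

theorem compl_length {l m : List String} (h : ComplOf l m) : m.length = l.length :=
  (List.Forall₂.length_eq h).symm

theorem compl_counts {l m : List String} (h : ComplOf l m) :
    m.count "X" + m.count "O" = l.count "X" + l.count "O" + l.count " " ∧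
      m.count " " = 0 := by
  unfold ComplOf at h
  induction h with
  | nil => simp
  | @cons e f l' m' hef _ ih =>
    by_cases h3 : e = " "
    · subst h3
      simp only [if_pos rfl] at hef
      rcases hef with rfl | rfl <;> simp [List.count_cons] <;> omega
    · rw [if_neg h3] at hef
      subst hef
      by_cases h1 : f = "O" <;> by_cases h2 : f = "X" <;>
        simp_all [List.count_cons] <;> omega

theorem compl_pointwise {l m : List String} (h : ComplOf l m) :
    ∀ t < l.length,
      (l.getD t "" = " " → (m.getD t "" = "X" ∨ m.getD t "" = "O")) ∧
      (l.getD t "" ≠ " " → m.getD t "" = l.getD t "") := by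
  intro t ht
  unfold ComplOf at h
  rw [List.forall₂_iff_get] at h
  have hlen := h.1
  have htm : t < m.length := by omega
  have := h.2 t ht htm
  rw [List.getD_eq_getElem l "" ht, List.getD_eq_getElem m "" htm]
  simp only [List.get_eq_getElem] at this
  by_cases hb : l[t] = " "
  · rw [if_pos hb] at this; exact ⟨fun _ => this, fun hc => absurd hb hc⟩
  · rw [if_neg hb] at this; exact ⟨fun hc => absurd hc hb, fun _ => this⟩

theorem compl_of_pointwise {l m : List String} (hlen : m.length = l.length)
    (h : ∀ t < l.length,
      (l.getD t "" = " " → (m.getD t "" = "X" ∨ m.getD t "" = "O")) ∧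
      (l.getD t "" ≠ " " → m.getD t "" = l.getD t "")) : ComplOf l m := by
  unfold ComplOf
  rw [List.forall₂_iff_get]
  refine ⟨hlen.symm, fun t h1 h2 => ?_⟩
  have := h t h1
  rw [List.getD_eq_getElem l "" h1, List.getD_eq_getElem m "" h2] at this
  simp only [List.get_eq_getElem]
  by_cases hb : l[t] = " "
  · rw [if_pos hb]; exact this.1 hb
  · rw [if_neg hb]; exact this.2 hb

-- all-X/O lists have length = count X + count O
theorem length_eq_counts {g : List String} (h : ∀ e ∈ g, e = "X" ∨ e = "O") :
    g.length = g.count "X" + g.count "O" := by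
  induction g with
  | nil => simp
  | cons e t ih =>
    have he := h e (by simp)
    have ht : ∀ x ∈ t, x = "X" ∨ x = "O" := fun x hx => h x (List.mem_cons_of_mem _ hx)
    rcases he with rfl | rfl <;> simp [List.count_cons, ih ht] <;> omega

-- characterisation of permutations(a, b) for a + b ≥ 1
theorem mem_permsA (fuel : Nat) : ∀ (a b : ℕ) (g : List String), a + b < fuel → 1 ≤ a + b →
    (g ∈ permsA fuel (a : Int) (b : Int) ↔
      (g.count "X" = a ∧ g.count "O" = b ∧ ∀ e ∈ g, e = "X" ∨ e = "O")) := by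
  induction fuel with
  | zero => intro a b g h; omega
  | succ fuel ih =>
    intro a b g hfuel hpos
    rcases Nat.eq_zero_or_pos a with ha | ha
    · subst ha
      have hb : b ≠ 0 := by omega
      rw [permsA]
      rw [if_neg (by push_cast; omega), if_pos (by push_cast)]
      simp only [List.mem_singleton]
      constructor
      · rintro rfl
        refine ⟨?_, ?_, ?_⟩
        · simp [List.count_replicate]
        · simp [List.count_replicate]
        · intro e he; right; exact (List.eq_of_mem_replicate he)
      · rintro ⟨hX, hO, hXO⟩
        have hall : ∀ e ∈ g, e = "O" := by
          intro e he
          rcases hXO e he with rfl | rfl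
          · exact absurd (List.count_pos_iff.mpr he) (by omega)
          · rfl
        have hlen : g.length = b := by
          have := length_eq_counts hXO; omega
        rw [List.eq_replicate_iff.mpr ⟨hlen, hall⟩]
        simp
    rcases Nat.eq_zero_or_pos b with hb | hb
    · subst hb
      rw [permsA]
      rw [if_neg (by push_cast; omega), if_neg (by push_cast; omega), if_pos (by push_cast)]
      simp only [List.mem_singleton]
      constructor
      · rintro rfl
        refine ⟨?_, ?_, ?_⟩
        · simp [List.count_replicate]
        · simp [List.count_replicate]
        · intro e he; left; exact (List.eq_of_mem_replicate he)
      · rintro ⟨hX, hO, hXO⟩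
        have hall : ∀ e ∈ g, e = "X" := by
          intro e he
          rcases hXO e he with rfl | rfl
          · rfl
          · exact absurd (List.count_pos_iff.mpr he) (by omega)
        have hlen : g.length = a := by
          have := length_eq_counts hXO; omega
        rw [List.eq_replicate_iff.mpr ⟨hlen, hall⟩]
        simp
    · -- a ≥ 1, b ≥ 1
      rw [permsA]
      rw [if_neg (by push_cast; omega), if_neg (by push_cast; omega), if_neg (by push_cast; omega)]
      have hc1 : ((a : Int) - 1) = ((a - 1 : Nat) : Int) := by omega
      have hc2 : ((b : Int) - 1) = ((b - 1 : Nat) : Int) := by omega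
      rw [hc1, hc2]
      have ih1 := ih (a - 1) b
      have ih2 := ih a (b - 1)
      simp only [List.mem_append, List.mem_map]
      constructor
      · rintro (⟨t, ht, rfl⟩ | ⟨t, ht, rfl⟩)
        · rcases (ih1 t (by omega) (by omega)).mp ht with ⟨hX, hO, hXO⟩
          refine ⟨by simp [List.count_cons, hX]; omega, by simp [List.count_cons, hO], ?_⟩
          intro e he
          rcases List.mem_cons.mp he with rfl | he'
          · left; rfl
          · exact hXO e he'
        · rcases (ih2 t (by omega) (by omega)).mp ht with ⟨hX, hO, hXO⟩
          refine ⟨by simp [List.count_cons, hX], by simp [List.count_cons, hO]; omega, ?_⟩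
          intro e he
          rcases List.mem_cons.mp he with rfl | he'
          · right; rfl
          · exact hXO e he'
      · rintro ⟨hX, hO, hXO⟩
        rcases g with _ | ⟨e, t⟩
        · simp at hX; omega
        have ht : ∀ x ∈ t, x = "X" ∨ x = "O" := fun x hx => hXO x (by simp [hx])
        rcases hXO e (by simp) with rfl | rfl
        · left
          refine ⟨t, ?_, rfl⟩
          refine (ih1 t (by omega) (by omega)).mpr ⟨?_, ?_, ht⟩
          · simp [List.count_cons] at hX; omega
          · simp [List.count_cons] at hO; omega
        · right
          refine ⟨t, ?_, rfl⟩
          refine (ih2 t (by omega) (by omega)).mpr ⟨?_, ?_, ht⟩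
          · simp [List.count_cons] at hX; omega
          · simp [List.count_cons] at hO; omega

theorem mergeA_compl : ∀ (l g : List String), g.length = l.count " " →
    (∀ e ∈ g, e = "X" ∨ e = "O") → ComplOf l (mergeA l g) := by
  intro l
  induction l with
  | nil => intro g _ _; unfold ComplOf; exact List.Forall₂.nil
  | cons e t ih =>
    intro g hlen hXO
    by_cases hb : e = " "
    · subst hb
      rw [List.count_cons_self] at hlen
      rcases g with _ | ⟨c, g'⟩
      · simp at hlen
      · simp only [mergeA, if_true]
        refine List.Forall₂.cons ?_ (ih g' (by simpa using hlen)
          (fun x hx => hXO x (by simp [hx])))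
        rw [if_pos rfl]
        exact hXO c (by simp)
    · simp only [mergeA]
      rw [if_neg hb]
      refine List.Forall₂.cons (by rw [if_neg hb]) (ih g ?_ hXO)
      rwa [List.count_cons_of_ne (by simpa using hb)] at hlen

-- extracting the placed characters back out of a completion
def extractC : List String → List String → List String
  | [], _ => []
  | _ :: _, [] => []
  | e :: l', f :: m' => if e = " " then f :: extractC l' m' else extractC l' m'

theorem extract_spec {l m : List String} (h : ComplOf l m) :
    (∀ e ∈ extractC l m, e = "X" ∨ e = "O") ∧
    (extractC l m).length = l.count " " ∧
    mergeA l (extractC l m) = m ∧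
    m.count "X" = l.count "X" + (extractC l m).count "X" ∧
    m.count "O" = l.count "O" + (extractC l m).count "O" := by
  unfold ComplOf at h
  induction h with
  | nil => simp [extractC, mergeA]
  | @cons e f l' m' hef _ ih =>
    obtain ⟨ihXO, ihlen, ihmerge, ihX, ihO⟩ := ih
    by_cases hb : e = " "
    · subst hb
      rw [if_pos rfl] at hef
      refine ⟨?_, ?_, ?_, ?_, ?_⟩
      · intro x hx
        simp only [extractC, if_true] at hx
        rcases List.mem_cons.mp hx with rfl | hx'
        · exact hef
        · exact ihXO x hx'
      · simp only [extractC, if_true]; simp [ihlen]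
      · simp only [extractC, mergeA, if_true]; rw [ihmerge]
      · simp only [extractC, if_true]
        rcases hef with rfl | rfl <;> simp [List.count_cons, ihX] <;> omega
      · simp only [extractC, if_true]
        rcases hef with rfl | rfl <;> simp [List.count_cons, ihO] <;> omega
    · rw [if_neg hb] at hef
      subst hef
      refine ⟨?_, ?_, ?_, ?_, ?_⟩
      · intro x hx; simp only [extractC] at hx; rw [if_neg hb] at hx; exact ihXO x hx
      · simp only [extractC]; rw [if_neg hb, ihlen, List.count_cons_of_ne (by simpa using hb)]
      · simp only [extractC, mergeA]; rw [if_neg hb]; rw [if_neg hb, ihmerge]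
      · simp only [extractC]; rw [if_neg hb]
        by_cases h1 : f = "X" <;> simp [List.count_cons, h1, ihX] <;> omega
      · simp only [extractC]; rw [if_neg hb]
        by_cases h1 : f = "O" <;> simp [List.count_cons, h1, ihO] <;> omega

-- A-side: membership in the accumulated result sets
def stepA (l : List String) (res : List (PySem.Set String)) (g : List String) :
    List (PySem.Set String) :=
  let m := mergeA l g
  if validate_line m then List.zipWith (fun s e => PySem.Set.add s e) res m else res

theorem getD_zipWith_add (res : List (PySem.Set String)) (m : List String) (i : Nat)
    (h : i < res.length) (hm : res.length = m.length) :
    (List.zipWith (fun s e => PySem.Set.add s e) res m).getD i [] =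
      PySem.Set.add (res.getD i []) (m.getD i "") := by
  have hz : i < (List.zipWith (fun s e => PySem.Set.add s e) res m).length := by
    rw [List.length_zipWith]; omega
  rw [List.getD_eq_getElem _ _ hz, List.getD_eq_getElem _ _ h,
      List.getD_eq_getElem _ _ (by omega : i < m.length)]
  simp [List.getElem_zipWith]

theorem fold_res_getD (l : List String) :
    ∀ (ps : List (List String)) (res : List (PySem.Set String)),
    (∀ g ∈ ps, (mergeA l g).length = l.length) → res.length = l.length →
    ∀ i, i < l.length → ∀ c,
    (c ∈ (ps.foldl (stepA l) res).getD i [] ↔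
      c ∈ res.getD i [] ∨
        ∃ g ∈ ps, validate_line (mergeA l g) = true ∧ (mergeA l g).getD i "" = c) := by
  intro ps
  induction ps with
  | nil => intro res _ _ i hi c; simp
  | cons g ps ih =>
    intro res hlen hres i hi c
    have hg := hlen g (List.mem_cons_self)
    simp only [List.foldl_cons]
    by_cases hv : validate_line (mergeA l g) = true
    · have hstep : stepA l res g = List.zipWith (fun s e => PySem.Set.add s e) res (mergeA l g) := by
        simp [stepA, hv]
      rw [hstep, ih _ (fun g' h' => hlen g' (List.mem_cons_of_mem _ h'))
          (by rw [List.length_zipWith]; omega) i hi c,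
        getD_zipWith_add res (mergeA l g) i (by omega) (by omega), PySem.Set.mem_add]
      constructor
      · rintro ((h | rfl) | ⟨g', hg', hv', he⟩)
        · exact Or.inl h
        · exact Or.inr ⟨g, List.mem_cons_self, hv, rfl⟩
        · exact Or.inr ⟨g', List.mem_cons_of_mem _ hg', hv', he⟩
      · rintro (h | ⟨g', hg', hv', he⟩)
        · exact Or.inl (Or.inl h)
        · rcases List.mem_cons.mp hg' with rfl | hg''
          · exact Or.inl (Or.inr he.symm)
          · exact Or.inr ⟨g', hg'', hv', he⟩
    · have hstep : stepA l res g = res := by simp [stepA, hv]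
      rw [hstep, ih _ (fun g' h' => hlen g' (List.mem_cons_of_mem _ h')) hres i hi c]
      constructor
      · rintro (h | ⟨g', hg', hv', he⟩)
        · exact Or.inl h
        · exact Or.inr ⟨g', List.mem_cons_of_mem _ hg', hv', he⟩
      · rintro (h | ⟨g', hg', hv', he⟩)
        · exact Or.inl h
        · rcases List.mem_cons.mp hg' with rfl | hg''
          · exact absurd hv' hv
          · exact Or.inr ⟨g', hg'', hv', he⟩

theorem fold_res_nodup (l : List String) :
    ∀ (ps : List (List String)) (res : List (PySem.Set String)),
    ∀ i, ((res.getD i []).Nodup) →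
    ((ps.foldl (stepA l) res).getD i []).Nodup := by
  intro ps
  induction ps with
  | nil => intro res i h; simpa using h
  | cons g ps ih =>
    intro res i h
    simp only [List.foldl_cons]
    apply ih
    simp only [stepA]
    split
    · by_cases hi : i < (List.zipWith (fun s e => PySem.Set.add s e) res (mergeA l g)).length
      · have h1 : i < res.length := by rw [List.length_zipWith] at hi; omega
        have h2 : res.length = (mergeA l g).length ∨ i < (mergeA l g).length := by
          rw [List.length_zipWith] at hi; omega
        rw [List.getD_eq_getElem _ _ hi]
        rw [List.getElem_zipWith]
        apply PySem.Set.nodup_add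
        rwa [← List.getD_eq_getElem res [] h1]
      · rw [List.getD_eq_default _ _ (by omega)]
        exact List.nodup_nil
    · exact h

-- B-side: what searchB explores
def ComplAt (line : List String) (rest : List Int) (m : List String) : Prop :=
  m.length = line.length ∧
  (∀ j ∈ rest, m.getD j.toNat "" = "X" ∨ m.getD j.toNat "" = "O") ∧
  (∀ k, k < line.length → (k : Int) ∉ rest → m.getD k "" = line.getD k "")

theorem eq_of_getD {m line : List String} (hlen : m.length = line.length)
    (h : ∀ k, k < line.length → m.getD k "" = line.getD k "") : m = line := by
  apply List.ext_getElem hlen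
  intro i h1 h2
  have := h i h2
  rwa [List.getD_eq_getElem _ _ h1, List.getD_eq_getElem _ _ h2] at this

theorem searchB_iff : ∀ (rest : List Int) (line : List String), rest.Nodup →
    (∀ j ∈ rest, 0 ≤ j ∧ j.toNat < line.length) →
    (searchB line rest = true ↔ ∃ m, ComplAt line rest m ∧ validate_line m = true) := by
  intro rest
  induction rest with
  | nil =>
    intro line _ _
    simp only [searchB]
    constructor
    · intro hv
      exact ⟨line, ⟨rfl, by simp, fun k _ _ => rfl⟩, hv⟩
    · rintro ⟨m, ⟨hlen, _, hout⟩, hv⟩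
      rwa [eq_of_getD hlen (fun k hk => hout k hk (by simp))] at hv
  | cons j rs ih =>
    intro line hnd hbd
    have hj0 : 0 ≤ j := (hbd j List.mem_cons_self).1
    have hjl : j.toNat < line.length := (hbd j List.mem_cons_self).2
    have hjrs : j ∉ rs := (List.nodup_cons.mp hnd).1
    have hrsnd : rs.Nodup := (List.nodup_cons.mp hnd).2
    have hjcast : ((j.toNat : Nat) : Int) = j := Int.toNat_of_nonneg hj0
    have hbd' : ∀ c, ∀ j' ∈ rs, 0 ≤ j' ∧ j'.toNat < (line.set j.toNat c).length := by
      intro c j' hj'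
      rw [List.length_set]
      exact hbd j' (List.mem_cons_of_mem _ hj')
    have key : ∀ c : String, (c = "X" ∨ c = "O") →
        (searchB (line.set j.toNat c) rs = true ↔
          ∃ m, ComplAt line (j :: rs) m ∧ m.getD j.toNat "" = c ∧ validate_line m = true) := by
      intro c hcXO
      rw [ih (line.set j.toNat c) hrsnd (hbd' c)]
      constructor
      · rintro ⟨m, ⟨hlen, hXO, hout⟩, hv⟩
        have hmj : m.getD j.toNat "" = c := by
          have := hout j.toNat (by rw [List.length_set]; exact hjl) (by rw [hjcast]; exact hjrs)
          rwa [List.getD_eq_getElem (line.set j.toNat c) _ (by rw [List.length_set]; exact hjl),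
               List.getElem_set_self (by rw [List.length_set]; exact hjl)] at this
        refine ⟨m, ⟨by rwa [List.length_set] at hlen, ?_, ?_⟩, hmj, hv⟩
        · intro j' hj'
          rcases List.mem_cons.mp hj' with rfl | hj''
          · rw [hmj]; exact hcXO
          · exact hXO j' hj''
        · intro k hk hknot
          have hkne : k ≠ j.toNat := by
            intro rfl'; subst rfl'; exact hknot (by rw [hjcast]; exact List.mem_cons_self)
          have := hout k (by rwa [List.length_set]) (fun hm => hknot (List.mem_cons_of_mem _ hm))
          rwa [List.getD_eq_getElem (line.set j.toNat c) _ (by rwa [List.length_set]),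
               List.getElem_set_ne (by omega), ← List.getD_eq_getElem line _ hk] at this
      · rintro ⟨m, ⟨hlen, hXO, hout⟩, hmj, hv⟩
        refine ⟨m, ⟨by rwa [List.length_set], fun j' hj' => hXO j' (List.mem_cons_of_mem _ hj'), ?_⟩, hv⟩
        intro k hk hknot
        rw [List.length_set] at hk
        by_cases hkj : k = j.toNat
        · subst hkj
          rw [hmj, List.getD_eq_getElem _ _ (by rw [List.length_set]; exact hjl),
              List.getElem_set_self (by rw [List.length_set]; exact hjl)]
        · have := hout k hk (by
            intro hm
            rcases List.mem_cons.mp hm with heq | hm'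
            · exact hkj (by omega)
            · exact hknot hm')
          rwa [List.getD_eq_getElem (line.set j.toNat c) _ (by rwa [List.length_set]),
               List.getElem_set_ne (by omega), ← List.getD_eq_getElem line _ hk]
    simp only [searchB]
    rw [PySem.List.pySetD_of_nonneg line "X" hj0, PySem.List.pySetD_of_nonneg line "O" hj0,
        Bool.or_eq_true,
        key "X" (Or.inl rfl), key "O" (Or.inr rfl)]
    constructor
    · rintro (⟨m, hm, _, hv⟩ | ⟨m, hm, _, hv⟩) <;> exact ⟨m, hm, hv⟩
    · rintro ⟨m, hm, hv⟩
      rcases hm.2.1 j List.mem_cons_self with hX | hO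
      · exact Or.inl ⟨m, hm, hX, hv⟩
      · exact Or.inr ⟨m, hm, hO, hv⟩

-- the blanks list of B
theorem blanksB_aux (l : List String) : ∀ (s : Int),
    (PySem.List.enumerate l s).filterMap (fun p => if p.2 = " " then some p.1 else none) =
      (List.range l.length).filterMap
        (fun k => if l.getD k "" = " " then some (s + (k : Int)) else none) := by
  induction l with
  | nil => intro s; simp [PySem.List.enumerate_nil]
  | cons e t ih =>
    intro s
    rw [PySem.List.enumerate_cons, List.filterMap_cons]
    have hrange : List.range (e :: t).length = 0 :: (List.range t.length).map Nat.succ := by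
      simpa using (List.range_succ_eq_map (n := t.length))
    rw [hrange, List.filterMap_cons, List.filterMap_map]
    have hcomp : ∀ k ∈ List.range t.length,
        ((fun k => if (e :: t).getD k "" = " " then some (s + (k : Int)) else none) ∘ Nat.succ) k
          = (fun k => if t.getD k "" = " " then some ((s+1) + (k : Int)) else none) k := by
      intro k _
      simp only [Function.comp_apply, List.getD_cons_succ]
      split <;> [skip; rfl]
      congr 1
      push_cast
      ring
    rw [List.filterMap_congr hcomp, ← ih (s+1)]
    by_cases he : e = " " <;> simp [he]

theorem blanksB_eq_range (l : List String) :
    (PySem.List.enumerate l).filterMap (fun p => if p.2 = " " then some p.1 else none) =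
      (List.range l.length).filterMap
        (fun k => if l.getD k "" = " " then some ((k : Nat) : Int) else none) := by
  have := blanksB_aux l 0
  simpa using this

theorem mem_blanksB (l : List String) (j : Int) :
    j ∈ (PySem.List.enumerate l).filterMap (fun p => if p.2 = " " then some p.1 else none) ↔
      ∃ k : Nat, k < l.length ∧ j = (k : Int) ∧ l.getD k "" = " " := by
  rw [blanksB_eq_range, List.mem_filterMap]
  constructor
  · rintro ⟨k, hk, hsome⟩
    rw [List.mem_range] at hk
    by_cases hb : l.getD k "" = " "
    · rw [if_pos hb] at hsome
      exact ⟨k, hk, (Option.some_inj.mp hsome).symm, hb⟩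
    · rw [if_neg hb] at hsome; cases hsome
  · rintro ⟨k, hk, rfl, hb⟩
    exact ⟨k, List.mem_range.mpr hk, by rw [if_pos hb]⟩

theorem nodup_blanksB (l : List String) :
    ((PySem.List.enumerate l).filterMap
      (fun p => if p.2 = " " then some p.1 else none)).Nodup := by
  rw [blanksB_eq_range]
  apply List.Nodup.filterMap _ (List.nodup_range)
  intro a a' b hb hb'
  by_cases h1 : l.getD a "" = " "
  · rw [if_pos h1] at hb
    by_cases h2 : l.getD a' "" = " "
    · rw [if_pos h2] at hb'
      have e1 := Option.some_inj.mp (Option.mem_def.mp hb)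
      have e2 := Option.some_inj.mp (Option.mem_def.mp hb')
      omega
    · rw [if_neg h2] at hb'; cases hb'
  · rw [if_neg h1] at hb; cases hb

-- counting helpers
theorem fold_res_length (l : List String) :
    ∀ (ps : List (List String)) (res : List (PySem.Set String)),
    (∀ g ∈ ps, (mergeA l g).length = l.length) → res.length = l.length →
    (ps.foldl (stepA l) res).length = l.length := by
  intro ps
  induction ps with
  | nil => intro res _ h; simpa using h
  | cons g ps ih =>
    intro res hlen hres
    simp only [List.foldl_cons]
    apply ih _ (fun g' h' => hlen g' (List.mem_cons_of_mem _ h'))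
    have hg := hlen g List.mem_cons_self
    simp only [stepA]
    split
    · rw [List.length_zipWith]; omega
    · exact hres

theorem init_getD (n : Nat) (i : Nat) :
    (List.replicate n (PySem.Set.ofList ([] : List String))).getD i [] = [] := by
  by_cases h : i < n
  · rw [List.getD_eq_getElem _ _ (by simpa using h), List.getElem_replicate]
    rfl
  · rw [List.getD_eq_default _ _ (by simpa using h)]

theorem foldl_if_count {α : Type} (p : α → Prop) [DecidablePred p] :
    ∀ (xs : List α) (c : Int),
    xs.foldl (fun c x => if p x then c + 1 else c) c
      = c + xs.countP (fun x => decide (p x)) := by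
  intro xs
  induction xs with
  | nil => intro c; simp
  | cons x t ih =>
    intro c
    simp only [List.foldl_cons, List.countP_cons]
    by_cases h : p x <;> simp [h, ih] <;> push_cast <;> ring

theorem countP_zip_getD (pr : String × PySem.Set String → Prop) [DecidablePred pr] :
    ∀ (l : List String) (res : List (PySem.Set String)), res.length = l.length →
    (l.zip res).countP (fun x => decide (pr x)) =
      (List.range l.length).countP (fun j => decide (pr (l.getD j "", res.getD j []))) := by
  intro l
  induction l with
  | nil => intro res h; simp
  | cons e t ih =>
    intro res h
    rcases res with _ | ⟨v, res'⟩
    · simp at h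
    · rw [List.zip_cons_cons, List.countP_cons,
        show List.range (e :: t).length = 0 :: (List.range t.length).map Nat.succ from
          (by simpa using (List.range_succ_eq_map (n := t.length))),
        List.countP_cons, List.countP_map, ih res' (by simpa using h)]
      congr 1

theorem filterMap_if_length {α β : Type} (q : α → Prop) [DecidablePred q] (f : α → β) :
    ∀ xs : List α, (xs.filterMap (fun x => if q x then some (f x) else none)).length
      = xs.countP (fun x => decide (q x)) := by
  intro xs
  induction xs with
  | nil => rfl
  | cons x t ih =>
    rw [List.filterMap_cons, List.countP_cons]
    by_cases h : q x <;> simp [h, ih]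

theorem countP_filterMap_if {α β : Type} (pc : α → Prop) [DecidablePred pc]
    (f : α → β) (q : β → Bool) :
    ∀ xs : List α, ((xs.filterMap (fun x => if pc x then some (f x) else none)).countP q)
      = xs.countP (fun x => decide (pc x) && q (f x)) := by
  intro xs
  induction xs with
  | nil => rfl
  | cons x t ih =>
    rw [List.filterMap_cons, List.countP_cons]
    by_cases h : pc x
    · rw [if_pos h, List.countP_cons]
      simp [h, ih]
    · rw [if_neg h]
      simp [h, ih]

theorem length_one_iff {t : List String} (hnd : t.Nodup)
    (hsub : ∀ e ∈ t, e = "X" ∨ e = "O") :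
    (t.length = 1) ↔ (("X" ∈ t ∧ "O" ∉ t) ∨ ("O" ∈ t ∧ "X" ∉ t)) := by
  rcases t with _ | ⟨a, _ | ⟨b, r⟩⟩
  · simp
  · rcases hsub a (by simp) with rfl | rfl <;> simp
  · simp only [List.length_cons]
    constructor
    · intro h; omega
    · have hab : a ≠ b := by
        intro rfl'
        exact (List.nodup_cons.mp hnd).1 (by simp [rfl'])
      rcases hsub a (by simp) with rfl | rfl <;> rcases hsub b (by simp) with hb | hb <;>
        simp_all
    
theorem filter_two_length (f : String → Bool) :
    ((["X", "O"].filter f).length = 1) ↔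
      ((f "X" = true ∧ ¬ f "O" = true) ∨ (f "O" = true ∧ ¬ f "X" = true)) := by
  cases hX : f "X" <;> cases hO : f "O" <;> simp [List.filter, hX, hO]

-- both programs return 0 on a line with no blanks
theorem blanksB_nil {l : List String} (h : l.count " " = 0) :
    (PySem.List.enumerate l).filterMap (fun p => if p.2 = " " then some p.1 else none) = [] := by
  rw [List.eq_nil_iff_forall_not_mem]
  intro j hj
  rcases (mem_blanksB l j).mp hj with ⟨k, hk, _, hblank⟩
  have : " " ∈ l := by
    rw [List.getD_eq_getElem _ _ hk] at hblank
    rw [← hblank]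
    exact List.getElem_mem _
  exact (List.count_eq_zero.mp h) this

theorem alt_no_blank {l : List String} (h : l.count " " = 0)
    (hg : ¬(l.count "O" < 3 ∧ l.count "X" < 3)) : fill_try_alt l = 0 := by
  simp only [fill_try_alt]
  rw [if_neg hg, blanksB_nil h]
  rfl

theorem a_no_blank {l : List String} (h : l.count " " = 0)
    (hg : ¬(l.count "O" < 3 ∧ l.count "X" < 3)) : fill_try l = 0 := by
  simp only [fill_try]
  rw [if_neg hg]
  split
  · rw [foldl_if_count (fun p : String × PySem.Set String => p.2.length = 1 ∧ p.1 = " ")]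
    rw [List.countP_eq_zero.mpr]
    · simp
    · intro p hp
      have hmem : p.1 ∈ l := (List.of_mem_zip hp).1
      have : p.1 ≠ " " := by
        intro rfl'
        exact (List.count_eq_zero.mp h) (by rwa [rfl'] at hmem)
      simp [this]
  · rfl

-- the main case: 10-cell accounting, at least one blank
theorem main_case {l : List String}
    (hX5 : l.count "X" ≤ 5) (hO5 : l.count "O" ≤ 5)
    (hsum : l.count " " + l.count "X" + l.count "O" = 10)
    (hS : 1 ≤ l.count " ")
    (hg : ¬(l.count "O" < 3 ∧ l.count "X" < 3)) :
    fill_try l = fill_try_alt l := by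
  have hcastX : (5 - ((l.count "X" : Nat) : Int)) = (((5 - l.count "X" : Nat) : Nat) : Int) := by
    omega
  have hcastO : (5 - ((l.count "O" : Nat) : Int)) = (((5 - l.count "O" : Nat) : Nat) : Int) := by
    omega
  set a : Nat := 5 - l.count "X" with ha
  set b : Nat := 5 - l.count "O" with hb
  have hmem : ∀ g, g ∈ permsA (a + b + 1) (a : Int) (b : Int) ↔
      (g.count "X" = a ∧ g.count "O" = b ∧ ∀ e ∈ g, e = "X" ∨ e = "O") :=
    fun g => mem_permsA (a + b + 1) a b g (by omega) (by omega)
  have hps : ∀ g ∈ permsA (a + b + 1) (a : Int) (b : Int),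
      g.length = l.count " " ∧ (mergeA l g).length = l.length ∧ ComplOf l (mergeA l g) := by
    intro g hgmem
    obtain ⟨hgX, hgO, hgXO⟩ := (hmem g).mp hgmem
    have hlen : g.length = l.count " " := by rw [length_eq_counts hgXO]; omega
    have hcm := mergeA_compl l g hlen hgXO
    exact ⟨hlen, compl_length hcm, hcm⟩
  have keyA : ∀ k, k < l.length → ∀ c,
      (c ∈ ((permsA (a + b + 1) (a : Int) (b : Int)).foldl (stepA l)
        (List.replicate l.length (PySem.Set.ofList ([] : List String)))).getD k [] ↔
        Feas l k c) := by
    intro k hk c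
    rw [fold_res_getD l _ _ (fun g h => (hps g h).2.1) (by simp) k hk c, init_getD]
    simp only [List.not_mem_nil, false_or]
    constructor
    · rintro ⟨g, hgmem, hv, he⟩
      exact ⟨mergeA l g, (hps g hgmem).2.2, hv, he⟩
    · rintro ⟨m, hcm, hv, he⟩
      obtain ⟨hc1, hc2⟩ := compl_counts hcm
      have hml : m.length = l.length := compl_length hcm
      have hvs := hv
      simp only [validate_line, Bool.and_eq_true, decide_eq_true_eq] at hvs
      obtain ⟨⟨⟨hsm, h2O⟩, h2X⟩, _⟩ := hvs
      have hm10 : m.length = 10 := by omega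
      obtain ⟨heXO, helen, hemerge, heX, heO⟩ := extract_spec hcm
      refine ⟨extractC l m, (hmem _).mpr ⟨by omega, by omega, heXO⟩, ?_, ?_⟩
      · rw [hemerge]; exact hv
      · rw [hemerge]; exact he
  have keyB : ∀ k : Nat, k < l.length → l.getD k "" = " " → ∀ c, (c = "X" ∨ c = "O") →
      (completableB l
          ((PySem.List.enumerate l).filterMap (fun p => if p.2 = " " then some p.1 else none))
          ((k : Nat) : Int) c = true ↔ Feas l k c) := by
    intro k hk hblank c hcXO
    unfold completableB
    rw [PySem.List.pySetD_of_nonneg l c (by omega : (0 : Int) ≤ (k : Int)),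
        show ((k : Nat) : Int).toNat = k by omega]
    set Bl := (PySem.List.enumerate l).filterMap
      (fun p => if p.2 = " " then some p.1 else none) with hBl
    have hrest_nd : (Bl.filter (fun j => j ≠ (k : Int))).Nodup :=
      (nodup_blanksB l).filter _
    have hrest_bd : ∀ j ∈ Bl.filter (fun j => j ≠ (k : Int)),
        0 ≤ j ∧ j.toNat < (l.set k c).length := by
      intro j hj
      obtain ⟨k', hk', rfl, _⟩ := (mem_blanksB l j).mp (List.mem_of_mem_filter hj)
      rw [List.length_set]
      exact ⟨by omega, by omega⟩
    rw [searchB_iff _ _ hrest_nd hrest_bd]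
    constructor
    · rintro ⟨m, ⟨hlen, hXO, hout⟩, hv⟩
      rw [List.length_set] at hlen
      have hmk : m.getD k "" = c := by
        have hknot : ((k : Nat) : Int) ∉ Bl.filter (fun j => j ≠ (k : Int)) := by
          simp [List.mem_filter]
        have := hout k (by rw [List.length_set]; exact hk) hknot
        rwa [List.getD_eq_getElem (l.set k c) _ (by rw [List.length_set]; exact hk),
             List.getElem_set_self (by rw [List.length_set]; exact hk)] at this
      refine ⟨m, compl_of_pointwise hlen ?_, hv, hmk⟩
      intro t ht
      constructor
      · intro htb
        by_cases htk : t = k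
        · subst htk; rw [hmk]; exact hcXO
        · have htB : ((t : Nat) : Int) ∈ Bl := (mem_blanksB l _).mpr ⟨t, ht, rfl, htb⟩
          have hmemf : ((t : Nat) : Int) ∈ Bl.filter (fun j => j ≠ (k : Int)) := by
            rw [List.mem_filter]
            refine ⟨htB, ?_⟩
            simp only [ne_eq, decide_eq_true_eq]
            omega
          have := hXO _ hmemf
          rwa [show ((t : Nat) : Int).toNat = t by omega] at this
      · intro htnb
        have htnB : ((t : Nat) : Int) ∉ Bl := by
          intro hmem'
          obtain ⟨k', hk', hkeq, hblank'⟩ := (mem_blanksB l _).mp hmem'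
          have het : t = k' := by omega
          exact htnb (by rw [het]; exact hblank')
        have htk : t ≠ k := by
          intro rfl'
          exact htnb (by rw [rfl']; exact hblank)
        have := hout t (by rw [List.length_set]; exact ht)
          (fun hm => htnB (List.mem_of_mem_filter hm))
        rwa [List.getD_eq_getElem (l.set k c) _ (by rw [List.length_set]; exact ht),
             List.getElem_set_ne (by omega), ← List.getD_eq_getElem l _ ht] at this
    · rintro ⟨m, hcm, hv, hmk⟩
      refine ⟨m, ⟨?_, ?_, ?_⟩, hv⟩
      · rw [List.length_set]; exact compl_length hcm
      · intro j hj
        obtain ⟨k', hk', rfl, hblank'⟩ := (mem_blanksB l _).mp (List.mem_of_mem_filter hj)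
        have := (compl_pointwise hcm k' hk').1 hblank'
        rwa [show ((k' : Nat) : Int).toNat = k' by omega]
      · intro t ht hnot
        rw [List.length_set] at ht
        by_cases htk : t = k
        · subst htk
          rw [hmk, List.getD_eq_getElem (l.set t c) _ (by rw [List.length_set]; exact ht),
              List.getElem_set_self (by rw [List.length_set]; exact ht)]
        · have hgetset : (l.set k c).getD t "" = l.getD t "" := by
            rw [List.getD_eq_getElem (l.set k c) _ (by rw [List.length_set]; exact ht),
                List.getElem_set_ne (by omega), ← List.getD_eq_getElem l _ ht]
          rw [hgetset]
          by_cases htb : l.getD t "" = " "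
          · exfalso
            apply hnot
            rw [List.mem_filter]
            refine ⟨(mem_blanksB l _).mpr ⟨t, ht, rfl, htb⟩, ?_⟩
            simp only [ne_eq, decide_eq_true_eq]
            omega
          · exact (compl_pointwise hcm t ht).2 htb
  have hguard : (permsA (a + b + 1) (a : Int) (b : Int)).all
      (fun g => decide (g.length = l.count " ")) = true := by
    rw [List.all_eq_true]
    intro g hgm
    simpa using (hps g hgm).1
  simp only [fill_try, fill_try_alt]
  rw [if_neg hg, if_neg hg, hcastX, hcastO]
  simp only [Int.toNat_natCast]
  rw [if_pos hguard]
  rw [show (fun (res : List (PySem.Set String)) (g : List String) =>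
        let m := mergeA l g
        if validate_line m then List.zipWith (fun s e => PySem.Set.add s e) res m else res)
      = stepA l from rfl]
  rw [foldl_if_count (fun p : String × PySem.Set String => p.2.length = 1 ∧ p.1 = " "),
      zero_add,
      countP_zip_getD _ l _ (fold_res_length l _ _ (fun g h => (hps g h).2.1) (by simp))]
  rw [filterMap_if_length
      (fun i : Int => ((["X", "O"].filter (fun c => completableB l
        ((PySem.List.enumerate l).filterMap (fun p => if p.2 = " " then some p.1 else none))
        i c)).length = 1))
      (fun i : Int => (i, (["X", "O"].filter (fun c => completableB l
        ((PySem.List.enumerate l).filterMap (fun p => if p.2 = " " then some p.1 else none))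
        i c)).headD ""))]
  rw [blanksB_eq_range l,
      countP_filterMap_if (fun k : Nat => l.getD k "" = " ") (fun k : Nat => ((k : Nat) : Int)) _]
  norm_cast
  apply List.countP_congr
  intro j hj
  rw [List.mem_range] at hj
  rw [← blanksB_eq_range l]
  by_cases hbl : l.getD j "" = " "
  · have hnd : (((permsA (a + b + 1) (a : Int) (b : Int)).foldl (stepA l)
        (List.replicate l.length (PySem.Set.ofList ([] : List String)))).getD j []).Nodup :=
      fold_res_nodup l _ _ j (by rw [init_getD]; exact List.nodup_nil)
    have hsub : ∀ e ∈ ((permsA (a + b + 1) (a : Int) (b : Int)).foldl (stepA l)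
        (List.replicate l.length (PySem.Set.ofList ([] : List String)))).getD j [],
        e = "X" ∨ e = "O" := by
      intro e he
      obtain ⟨m, hcm, _, hme⟩ := (keyA j hj e).mp he
      rw [← hme]
      exact (compl_pointwise hcm j hj).1 hbl
    have hiff : (((permsA (a + b + 1) (a : Int) (b : Int)).foldl (stepA l)
        (List.replicate l.length (PySem.Set.ofList ([] : List String)))).getD j []).length = 1 ↔
        ((["X", "O"].filter (fun c => completableB l
          ((PySem.List.enumerate l).filterMap (fun p => if p.2 = " " then some p.1 else none))
          ((j : Nat) : Int) c)).length = 1) := by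
      rw [length_one_iff hnd hsub,
          filter_two_length (fun c => completableB l
            ((PySem.List.enumerate l).filterMap (fun p => if p.2 = " " then some p.1 else none))
            ((j : Nat) : Int) c),
          keyA j hj "X", keyA j hj "O",
          keyB j hj hbl "X" (Or.inl rfl), keyB j hj hbl "O" (Or.inr rfl)]
    rw [List.getD_eq_getElem?_getD] at hbl
    simpa [hbl] using hiff
  · rw [List.getD_eq_getElem?_getD] at hbl
    simp [hbl]

-- ===== VERDICT (by name: the statement is the Claim_ definition above) =====
theorem fill_try_spec : Claim_equal_fill_try := by
  unfold Claim_equal_fill_try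
  intro l _ hpre
  unfold Spec_fill_try
  by_cases hg : l.count "O" < 3 ∧ l.count "X" < 3
  · simp only [fill_try, fill_try_alt]
    rw [if_pos hg, if_pos hg]
  · rcases hpre with h1 | ⟨hX5, hO5, hsum⟩ | ⟨hS0, _⟩
    · exact absurd h1 hg
    · rcases Nat.eq_zero_or_pos (l.count " ") with hS0 | hS
      · rw [a_no_blank hS0 hg, alt_no_blank hS0 hg]
      · exact main_case hX5 hO5 hsum hS hg
    · rw [a_no_blank hS0 hg, alt_no_blank hS0 hg]
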